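-- pv_equiv track=rewrite | github.com/alexzigler/Projects | Python - mathematX app - in progress/main.py | adaptstr
-- ===== SOURCE A (Python) =====
-- def adaptstr(s):
--     rez=''
--     if s[0]=='x':
--         rez+='1'
--         rez+='x'
--     else: rez+=s[0]
--     for i in range(1,len(s)):
--         if s[i]=='x' and not s[i-1].isdigit():
--             rez+='1'
--             rez+='x'
--         else:
--             rez+=s[i]
--
--     rez2=''
--     if rez[0]=='-':
--         rez2+='+'
--         rez2+='-'
--     else:
--         rez2+=rez[0]
--     for i in range (1,len(rez)):
--         if rez[i]=='-':
--             rez2+='+-'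
--         else:rez2+=rez[i]
--
--     return rez2
-- ===== SOURCE B (Python) =====
-- def adaptstr(s):
--     def piece(p, c):
--         if c == 'x' and not p.isdigit():
--             return '1x'
--         if c == '-':
--             return '+-'
--         return c
--     return ''.join(piece(p, c) for p, c in zip(' ' + s, s))
-- ===== Notes on version B (the rewrite author's own statement) =====
-- stated objective: simpler
-- what changed: A builds an intermediate string in a first pass (inserting '1' before an uncoefficiented 'x') and rescans it in a second pass (rewriting '-' to '+-'); B is a stateless map-join: it zips the string with a space-prepended copy of itself and maps each (prev, char) pair straight to its output piece, with no intermediate string and no special-cased first character.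
import Mathlib
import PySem

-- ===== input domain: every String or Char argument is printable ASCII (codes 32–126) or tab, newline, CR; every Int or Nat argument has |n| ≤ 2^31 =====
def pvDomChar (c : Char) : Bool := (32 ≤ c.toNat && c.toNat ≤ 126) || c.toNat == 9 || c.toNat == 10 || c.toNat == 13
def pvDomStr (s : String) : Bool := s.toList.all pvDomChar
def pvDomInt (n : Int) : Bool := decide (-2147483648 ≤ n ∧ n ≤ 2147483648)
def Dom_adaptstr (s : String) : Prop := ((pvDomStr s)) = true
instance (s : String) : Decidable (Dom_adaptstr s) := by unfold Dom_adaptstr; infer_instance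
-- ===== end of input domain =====

-- B replaces A's two staged passes (insert '1' before uncoefficiented 'x'; then rescan rewriting '-' to '+-')
-- by a stateless map-join over the string zipped with a space-prepended copy of itself; same return value.

-- ===== PORT A =====
-- A's first loop: for i in range(1,len(s)), reading s[i] and s[i-1]; carried here as (prev char, remaining chars).
-- Char.isDigit is exact for Python's str.isdigit on the single ASCII characters of Dom.
def adaptstrLoop1 (prev : Char) : List Char → List Char
  | [] => []
  | c :: rest => (if c = 'x' ∧ ¬ prev.isDigit then ['1', 'x'] else [c]) ++ adaptstrLoop1 c rest

-- A's second loop: for i in range(1,len(rez)), reading rez[i] only.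
def adaptstrLoop2 : List Char → List Char
  | [] => []
  | c :: rest => (if c = '-' then ['+', '-'] else [c]) ++ adaptstrLoop2 rest

def adaptstr (s : String) : String :=
  match s.toList with
  | [] => ""        -- unreachable under Pre_ (Python raises IndexError at s[0])
  | c :: rest =>
    -- rez: head handled separately (the 'if s[0]==...' before the loop), then the loop
    match (if c = 'x' then ['1', 'x'] else [c]) ++ adaptstrLoop1 c rest with
    | [] => ""      -- unreachable: rez is nonempty
    | d :: rest2 =>
      String.mk ((if d = '-' then ['+', '-'] else [d]) ++ adaptstrLoop2 rest2)

-- ===== PORT B =====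
-- B's piece(p, c): the output chunk for character c whose predecessor is p.
def adaptstrPiece (p c : Char) : List Char :=
  if c = 'x' ∧ ¬ p.isDigit then ['1', 'x']
  else if c = '-' then ['+', '-']
  else [c]

-- ''.join(piece(p, c) for p, c in zip(' ' + s, s))
def adaptstr_alt (s : String) : String :=
  String.mk (((' ' :: s.toList).zip s.toList).flatMap (fun pc => adaptstrPiece pc.1 pc.2))

-- ===== PRECONDITION & SPEC =====
-- Pre_ excludes only the empty string, on which A raises IndexError at s[0].
def Pre_adaptstr (s : String) : Prop := s ≠ ""
instance (s : String) : Decidable (Pre_adaptstr s) := by unfold Pre_adaptstr; infer_instance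
def pvWitness_adaptstr : String := "-2x"

def Spec_adaptstr (s : String) (out : String) : Prop := out = adaptstr_alt s
instance (s : String) (out : String) : Decidable (Spec_adaptstr s out) := by unfold Spec_adaptstr; infer_instance

-- ===== CLAIM (what is proved, stated in full; the proofs are below) =====
def Claim_equal_adaptstr : Prop := ∀ (s : String), Dom_adaptstr s → Pre_adaptstr s → Spec_adaptstr s (adaptstr s)

-- ===== LEMMAS AND PROOFS =====
theorem adaptstrLoop2_append (a b : List Char) :
    adaptstrLoop2 (a ++ b) = adaptstrLoop2 a ++ adaptstrLoop2 b := by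
  induction a with
  | nil => simp [adaptstrLoop2]
  | cons c rest ih => simp [adaptstrLoop2, ih]

-- fusion invariant: A's second pass over A's first-pass loop output = B's zip/flatMap on the tail with prev prepended
theorem loop2_loop1 (prev : Char) (l : List Char) :
    adaptstrLoop2 (adaptstrLoop1 prev l)
      = ((prev :: l).zip l).flatMap (fun pc => adaptstrPiece pc.1 pc.2) := by
  induction l generalizing prev with
  | nil => rfl
  | cons c rest ih =>
    simp only [adaptstrLoop1, adaptstrLoop2_append, ih, List.zip_cons_cons, List.flatMap_cons]
    by_cases hx : c = 'x' ∧ ¬ prev.isDigit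
    · simp [hx, adaptstrPiece, adaptstrLoop2]
    · simp only [if_neg hx, adaptstrPiece]
      by_cases hm : c = '-' <;> simp [hm, adaptstrLoop2]

-- ===== VERDICT (by name: the statement is the Claim_ definition above) =====
theorem adaptstr_spec : Claim_equal_adaptstr := by
  intro s _ hpre
  unfold Spec_adaptstr adaptstr adaptstr_alt
  cases hsl : s.toList with
  | nil => exact absurd (by rw [← s.ofList_toList, hsl]) hpre
  | cons c rest =>
    simp only [List.zip_cons_cons, List.flatMap_cons]
    by_cases hx : c = 'x'
    · -- head piece is '1' :: 'x' :: …; '1' ≠ '-'; ' ' is not a digit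
      simp [hx, adaptstrLoop2, loop2_loop1, adaptstrPiece]
    · simp only [if_neg hx]
      by_cases hm : c = '-'
      · simp [hm, loop2_loop1, adaptstrPiece]
      · simp [hm, hx, loop2_loop1, adaptstrPiece]
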